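-- pv_equiv track=rewrite | github.com/derenay/ForTra | generatedatav2/g4.py | generate_regular_vee
-- ===== SOURCE A (Python) =====
-- def generate_regular_vee(num_objects, center, spread):
--     # Vee formasyonu: Ucu önde, iki kol yukarıya doğru açılır.
--     cx, cy = center
--     coords = []
--     coords.append([cx, cy])
--     i = 1
--     while len(coords) < num_objects:
--         left_x = cx - spread * i
--         left_y = cy + spread * i
--         coords.append([left_x, left_y])
--         if len(coords) >= num_objects:
--             break
--         right_x = cx + spread * i
--         right_y = cy + spread * i
--         coords.append([right_x, right_y])
--         i += 1
--     return coords[:num_objects]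
-- ===== SOURCE B (Python) =====
-- def generate_regular_vee(num_objects, center, spread):
--     # Build the two arms as separate lists, then merge: center, then zip-interleave
--     # left/right pairs, then the one unmatched left point when the count is even.
--     cx, cy = center
--     n_left = num_objects // 2
--     n_right = (num_objects - 1) // 2
--     left = [[cx - spread * i, cy + spread * i] for i in range(1, n_left + 1)]
--     right = [[cx + spread * i, cy + spread * i] for i in range(1, n_right + 1)]
--     coords = [[cx, cy]] if num_objects >= 1 else []
--     for l, r in zip(left, right):
--         coords.append(l)
--         coords.append(r)
--     if len(left) > len(right):
--         coords.append(left[-1])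
--     return coords
-- ===== Notes on version B (the rewrite author's own statement) =====
-- stated objective: alternative
-- what changed: B builds the left and right arms as two separate comprehension lists and merges them (center, zip-interleave of the arm pairs, then the unmatched left point when the count is even), replacing A's single while loop that appends two points per iteration and truncates with a final slice.
import Mathlib
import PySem

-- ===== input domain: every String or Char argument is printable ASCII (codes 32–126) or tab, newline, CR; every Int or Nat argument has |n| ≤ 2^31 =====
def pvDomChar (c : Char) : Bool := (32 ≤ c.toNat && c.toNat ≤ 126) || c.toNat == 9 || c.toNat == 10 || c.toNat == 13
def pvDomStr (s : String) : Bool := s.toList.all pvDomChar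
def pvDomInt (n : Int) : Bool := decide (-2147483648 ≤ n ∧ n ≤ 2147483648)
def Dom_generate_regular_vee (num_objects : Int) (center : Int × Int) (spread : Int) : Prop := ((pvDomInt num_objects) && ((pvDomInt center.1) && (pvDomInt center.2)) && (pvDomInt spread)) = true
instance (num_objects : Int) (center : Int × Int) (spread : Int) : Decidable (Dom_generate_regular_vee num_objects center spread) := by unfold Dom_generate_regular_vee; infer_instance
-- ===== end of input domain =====

-- B builds the two arms as separate lists and merges them (center, zip-interleave, unmatched
-- left point), replacing A's while loop that appends two points per step and slices at the end.

-- ===== PORT A =====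
-- the while loop of A: `while len(coords) < num_objects: append left; if …: break; append right; i += 1`
-- (fuel = num_objects.toNat is a totality guard only: each iteration grows coords, see veeLoop_closed)
def veeLoop (fuel : Nat) (num_objects cx cy spread : Int) (i : Int) (coords : List (List Int)) : List (List Int) :=
  match fuel with
  | 0 => coords
  | fuel + 1 =>
    if (coords.length : Int) < num_objects then
      let coords1 := coords ++ [[cx - spread * i, cy + spread * i]]
      if (coords1.length : Int) ≥ num_objects then coords1
      else veeLoop fuel num_objects cx cy spread (i + 1) (coords1 ++ [[cx + spread * i, cy + spread * i]])
    else coords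

def generate_regular_vee (num_objects : Int) (center : Int × Int) (spread : Int) : List (List Int) :=
  let cx := center.1
  let cy := center.2
  let coords : List (List Int) := [] ++ [[cx, cy]]
  PySem.List.slice (veeLoop num_objects.toNat num_objects cx cy spread 1 coords) none (some num_objects)

-- ===== PORT B =====
def generate_regular_vee_alt (num_objects : Int) (center : Int × Int) (spread : Int) : List (List Int) :=
  let cx := center.1
  let cy := center.2
  let n_left := PySem.Int.floordiv num_objects 2
  let n_right := PySem.Int.floordiv (num_objects - 1) 2
  let left := (PySem.List.pyRange 1 (n_left + 1) 1).map (fun i => [cx - spread * i, cy + spread * i])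
  let right := (PySem.List.pyRange 1 (n_right + 1) 1).map (fun i => [cx + spread * i, cy + spread * i])
  let coords : List (List Int) := if num_objects ≥ 1 then [[cx, cy]] else []
  let coords := (left.zip right).foldl (fun acc p => (acc ++ [p.1]) ++ [p.2]) coords
  if left.length > right.length then
    -- left[-1]: the guard guarantees left is nonempty, so pyGetD's default is never used
    coords ++ [PySem.List.pyGetD left (-1) []]
  else coords

-- ===== PRECONDITION & SPEC =====
def Spec_generate_regular_vee (num_objects : Int) (center : Int × Int) (spread : Int) (out : List (List Int)) : Prop := out = generate_regular_vee_alt num_objects center spread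
instance (num_objects : Int) (center : Int × Int) (spread : Int) (out : List (List Int)) : Decidable (Spec_generate_regular_vee num_objects center spread out) := by unfold Spec_generate_regular_vee; infer_instance

-- ===== CLAIM (what is proved, stated in full; the proofs are below) =====
def Claim_equal_generate_regular_vee : Prop := ∀ (num_objects : Int) (center : Int × Int) (spread : Int), Dom_generate_regular_vee num_objects center spread → Spec_generate_regular_vee num_objects center spread (generate_regular_vee num_objects center spread)

-- ===== LEMMAS AND PROOFS =====

-- the m-th point of the formation, in closed form
def veeAt (cx cy spread : Int) (m : Nat) : List Int :=
  if m = 0 then [cx, cy]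
  else
    let i : Int := ((m + 1) / 2 : Nat)
    if m % 2 = 1 then [cx - spread * i, cy + spread * i] else [cx + spread * i, cy + spread * i]

theorem veeAt_odd (cx cy s : Int) (k : Nat) (hk : 1 ≤ k) :
    veeAt cx cy s (2 * k - 1) = [cx - s * (k : Int), cy + s * (k : Int)] := by
  have h0 : ¬ (2 * k - 1 = 0) := by omega
  have h1 : (2 * k - 1) % 2 = 1 := by omega
  have h2 : (2 * k - 1 + 1) / 2 = k := by omega
  simp [veeAt, h0, h1, h2]

theorem veeAt_even (cx cy s : Int) (k : Nat) (hk : 1 ≤ k) :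
    veeAt cx cy s (2 * k) = [cx + s * (k : Int), cy + s * (k : Int)] := by
  have h0 : ¬ (2 * k = 0) := by omega
  have h2 : (2 * k + 1) / 2 = k := by omega
  simp [veeAt, h0, h2]

theorem veeLoop_closed (n cx cy s : Int) (fuel : Nat) (k : Nat) (hk : 1 ≤ k)
    (hf : (n - ((2 * k - 1 : Nat) : Int)).toNat ≤ fuel) :
    ∃ m : Nat, n ≤ (m : Int) ∧ (m : Int) ≤ max ((2 * k - 1 : Nat) : Int) (n + 1) ∧
      veeLoop fuel n cx cy s (k : Int) ((List.range (2 * k - 1)).map (veeAt cx cy s)) =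
        (List.range m).map (veeAt cx cy s) := by
  induction fuel generalizing k with
  | zero =>
    have hn : n ≤ ((2 * k - 1 : Nat) : Int) := by omega
    exact ⟨2 * k - 1, hn, by omega, rfl⟩
  | succ fuel ih =>
    by_cases hg : ((2 * k - 1 : Nat) : Int) < n
    · rw [veeLoop]
      simp only [List.length_map, List.length_range, List.length_append, List.length_cons,
        List.length_nil]
      rw [if_pos (by omega)]
      by_cases hb : ((2 * k - 1 : Nat) : Int) + 1 ≥ n
      · refine ⟨2 * k, by omega, by omega, ?_⟩
        rw [if_pos (by push_cast; omega)]
        have hr : List.range (2 * k) = List.range (2 * k - 1) ++ [2 * k - 1] := by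
          conv_lhs => rw [show (2 * k : Nat) = (2 * k - 1) + 1 from by omega, List.range_succ]
        rw [hr, List.map_append, List.map_singleton, veeAt_odd cx cy s k hk]
      · rw [if_neg (by push_cast; omega)]
        have harg : ((List.range (2 * k - 1)).map (veeAt cx cy s) ++
              [[cx - s * (k : Int), cy + s * (k : Int)]]) ++
              [[cx + s * (k : Int), cy + s * (k : Int)]] =
            (List.range (2 * (k + 1) - 1)).map (veeAt cx cy s) := by
          have hr : List.range (2 * k) = List.range (2 * k - 1) ++ [2 * k - 1] := by
            conv_lhs => rw [show (2 * k : Nat) = (2 * k - 1) + 1 from by omega, List.range_succ]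
          have hr1 : List.range (2 * (k + 1) - 1) = List.range (2 * k) ++ [2 * k] := by
            conv_lhs => rw [show (2 * (k + 1) - 1 : Nat) = 2 * k + 1 from by omega, List.range_succ]
          rw [hr1, hr, List.map_append, List.map_append, List.map_singleton, List.map_singleton,
            veeAt_odd cx cy s k hk, veeAt_even cx cy s k hk]
        rw [harg]
        have hcast : ((k : Int) + 1) = ((k + 1 : Nat) : Int) := by push_cast; ring
        rw [hcast]
        obtain ⟨m, hm1, hm2, hm3⟩ := ih (k + 1) (by omega) (by omega)
        refine ⟨m, hm1, ?_, hm3⟩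
        push_cast at hm2 hg ⊢
        omega
    · refine ⟨2 * k - 1, by omega, by omega, ?_⟩
      rw [veeLoop]
      simp only [List.length_map, List.length_range]
      rw [if_neg (by omega)]

-- A computes the first n.toNat closed-form points
theorem a_eq_map (n cx cy s : Int) :
    generate_regular_vee n (cx, cy) s = (List.range n.toNat).map (veeAt cx cy s) := by
  unfold generate_regular_vee
  simp only []
  have hinit : ([] ++ [[cx, cy]] : List (List Int)) =
      (List.range (2 * 1 - 1)).map (veeAt cx cy s) := by
    simp [veeAt]
  obtain ⟨m, hm1, hm2, hm3⟩ := veeLoop_closed n cx cy s n.toNat 1 le_rfl (by omega)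
  norm_num at hm2 hm3
  rw [hinit]
  norm_num
  rw [hm3]
  rcases (by omega : n ≤ 0 ∨ 0 < n) with hn | hn
  · have hm1' : m ≤ 1 := by omega
    rcases eq_or_lt_of_le hn with hz | hneg
    · subst hz
      rw [PySem.List.slice_to _ le_rfl]
      simp
    · rw [show (n : Int) = -((((-n).toNat : Nat)) : Int) from by omega,
        PySem.List.slice_to_neg_natCast _ (-n).toNat (by omega)]
      simp only [List.length_map, List.length_range]
      rw [show m - (-n).toNat = 0 from by omega, List.take_zero]
      rw [show ((-(((-n).toNat : Nat) : Int)).toNat) = 0 from by omega]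
      simp
  · rw [PySem.List.slice_to _ (le_of_lt hn)]
    rw [← List.map_take, List.take_range, Nat.min_eq_left (by omega)]

-- the interleaving fold is init ++ flatMap of the pairs
theorem foldl_interleave {α : Type} (zs : List (α × α)) (init : List α) :
    zs.foldl (fun acc p => (acc ++ [p.1]) ++ [p.2]) init
      = init ++ zs.flatMap (fun p => [p.1, p.2]) := by
  induction zs generalizing init with
  | nil => simp
  | cons z zs ih => rw [List.foldl_cons, ih, List.flatMap_cons]; simp [List.append_assoc]

-- zipping a longer left list truncates away its tail
theorem zip_append_left {α β : Type} (a b : List α) (c : List β) (h : c.length ≤ a.length) :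
    (a ++ b).zip c = a.zip c := by
  induction a generalizing c with
  | nil =>
    have : c = [] := by
      cases c with
      | nil => rfl
      | cons y c => simp at h
    simp [this]
  | cons x a ih =>
    cases c with
    | nil => simp
    | cons y c =>
      simp only [List.cons_append, List.zip_cons_cons]
      rw [ih c (by simpa using h)]

-- zipping two range-maps truncates to the shorter range
theorem zip_map_range {α β : Type} (f : Nat → α) (g : Nat → β) (RN LN : Nat) (h : RN ≤ LN) :
    ((List.range LN).map f).zip ((List.range RN).map g)
      = (List.range RN).map (fun k => (f k, g k)) := by
  rw [show LN = RN + (LN - RN) from by omega, List.range_add, List.map_append,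
    zip_append_left _ _ _ (by simp), List.zip_map']

-- flatMap of the left/right pairs yields the points 1 … 2R in order
theorem flatMap_pairs (cx cy s : Int) (R : Nat) :
    (List.range R).flatMap (fun (k : Nat) =>
        [[cx - s * (1 + (k : Int)), cy + s * (1 + (k : Int))],
         [cx + s * (1 + (k : Int)), cy + s * (1 + (k : Int))]])
      = (List.range (2 * R)).map (fun m => veeAt cx cy s (m + 1)) := by
  induction R with
  | zero => simp
  | succ R ih =>
    rw [List.range_succ, List.flatMap_append, ih,
      show 2 * (R + 1) = (2 * R + 1) + 1 from by ring, List.range_succ, List.range_succ,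
      List.map_append, List.map_append]
    have hodd : veeAt cx cy s (2 * R + 1) = [cx - s * (1 + (R : Int)), cy + s * (1 + (R : Int))] := by
      have := veeAt_odd cx cy s (R + 1) (by omega)
      rw [show 2 * (R + 1) - 1 = 2 * R + 1 from by omega] at this
      rw [this]; push_cast; ring_nf
    have heven : veeAt cx cy s (2 * R + 1 + 1) = [cx + s * (1 + (R : Int)), cy + s * (1 + (R : Int))] := by
      have := veeAt_even cx cy s (R + 1) (by omega)
      rw [show 2 * (R + 1) = 2 * R + 1 + 1 from by omega] at this
      rw [this]; push_cast; ring_nf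
    simp [hodd, heven, List.append_assoc]

-- B computes the same first n.toNat closed-form points
theorem alt_eq_map (n cx cy s : Int) :
    generate_regular_vee_alt n (cx, cy) s = (List.range n.toNat).map (veeAt cx cy s) := by
  unfold generate_regular_vee_alt
  simp only []
  rw [PySem.Int.floordiv_eq_ediv_of_pos (by omega : (0:Int) < 2),
      PySem.Int.floordiv_eq_ediv_of_pos (by omega : (0:Int) < 2)]
  rcases (by omega : n ≤ 0 ∨ 0 < n) with hn | hn
  · rw [PySem.List.pyRange_one_eq_nil (by omega : (n / 2 + 1 : Int) ≤ 1),
      PySem.List.pyRange_one_eq_nil (by omega : ((n - 1) / 2 + 1 : Int) ≤ 1),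
      if_neg (by omega : ¬ (n ≥ 1))]
    simp [Int.toNat_of_nonpos hn]
  · -- n ≥ 1: reduce everything to Nat indices LN = N/2, RN = (N-1)/2, N = LN + RN + 1
    set N := n.toNat with hN
    set LN := N / 2 with hLN
    set RN := (N - 1) / 2 with hRN
    have hn1 : 1 ≤ N := by omega
    have hLi : n / 2 = (LN : Int) := by omega
    have hRi : (n - 1) / 2 = (RN : Int) := by omega
    have hle : RN ≤ LN := by omega
    have hle2 : LN ≤ RN + 1 := by omega
    have hsum : N = LN + RN + 1 := by omega
    rw [hLi, hRi, PySem.List.pyRange_one, PySem.List.pyRange_one,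
      show ((LN : Int) + 1 - 1).toNat = LN from by omega,
      show ((RN : Int) + 1 - 1).toNat = RN from by omega,
      List.map_map, List.map_map, if_pos (by omega : n ≥ 1)]
    rw [zip_map_range _ _ RN LN hle, foldl_interleave, List.flatMap_map]
    simp only [Function.comp]
    rw [flatMap_pairs cx cy s RN]
    have hcenter : ([[cx, cy]] : List (List Int)) ++
        (List.range (2 * RN)).map (fun m => veeAt cx cy s (m + 1))
        = (List.range (2 * RN + 1)).map (veeAt cx cy s) := by
      rw [List.range_succ_eq_map, List.map_cons, List.map_map]
      simp [veeAt, Function.comp]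
    rw [hcenter]
    simp only [List.length_map, List.length_range]
    rcases Nat.eq_or_lt_of_le hle with hEq | hlt
    · -- LN = RN: odd count, no unmatched left point
      rw [if_neg (by omega)]
      rw [show N = 2 * RN + 1 from by omega]
    · -- LN = RN + 1: even count, append left[-1]
      have hL : LN = RN + 1 := by omega
      rw [if_pos (by omega)]
      simp only [Function.comp_def]
      have hsplit : (List.range LN).map
          (fun (x : Nat) => [cx - s * (1 + (x : Int)), cy + s * (1 + (x : Int))])
          = (List.range RN).map (fun (x : Nat) => [cx - s * (1 + (x : Int)), cy + s * (1 + (x : Int))])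
            ++ [[cx - s * (1 + (RN : Int)), cy + s * (1 + (RN : Int))]] := by
        rw [hL, List.range_succ, List.map_append, List.map_singleton]
      rw [hsplit, PySem.List.pyGetD_neg_one_append_singleton]
      have hlast : ([[cx - s * (1 + (RN : Int)), cy + s * (1 + (RN : Int))]] : List (List Int))
          = [veeAt cx cy s (2 * RN + 1)] := by
        have := veeAt_odd cx cy s (RN + 1) (by omega)
        rw [show 2 * (RN + 1) - 1 = 2 * RN + 1 from by omega] at this
        rw [this]; push_cast; ring_nf
      rw [hlast, show N = (2 * RN + 1) + 1 from by omega]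
      simp [List.range_succ, List.append_assoc]

theorem generate_regular_vee_spec : Claim_equal_generate_regular_vee := by
  intro n c s _hdom
  unfold Spec_generate_regular_vee
  obtain ⟨cx, cy⟩ := c
  rw [a_eq_map, alt_eq_map]
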